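-- pv_equiv track=rewrite | github.com/hexanna1/hex-study | pattern_enumeration.py | _anchored_span_domain
-- ===== SOURCE A (Python) =====
-- Point = tuple[int, int]
--
-- def _delta(a: Point, b: Point) -> int:
--     dq = int(a[0]) - int(b[0])
--     dr = int(a[1]) - int(b[1])
--     return int(dq * dq + dq * dr + dr * dr)
--
-- def _anchored_span_domain(Δ_max: int) -> tuple[Point, ...]:
--     if Δ_max < 0:
--         raise ValueError("Δ_max must be >= 0")
--     origin = (0, 0)
--     limit = int(Δ_max)
--     out: list[Point] = []
--     for q in range(-limit, limit + 1):
--         for r in range(-limit, limit + 1):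
--             point = (int(q), int(r))
--             if point <= origin:
--                 continue
--             if _delta(origin, point) <= int(Δ_max):
--                 out.append(point)
--     out.sort()
--     return tuple(out)
-- ===== SOURCE B (Python) =====
-- def _anchored_span_domain(Δ_max: int) -> tuple:
--     if Δ_max < 0:
--         raise ValueError("Δ_max must be >= 0")
--     d4 = 4 * int(Δ_max)
--     out = []
--     q = 0
--     while 3 * q * q <= d4:
--         # integer solutions r of q*q + q*r + r*r <= Δ_max  <=>  (2r+q)^2 <= D
--         D = d4 - 3 * q * q
--         s = 0                      # s = isqrt(D)
--         while (s + 1) * (s + 1) <= D: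
--             s += 1
--         lo = 1 if q == 0 else -((q + s) // 2)
--         hi = (s - q) // 2
--         for r in range(lo, hi + 1):
--             out.append((q, r))
--         q += 1
--     return tuple(out)
-- ===== Notes on version B (the rewrite author's own statement) =====
-- stated objective: faster
-- what changed: Instead of scanning the full (2Δ+1)×(2Δ+1) grid and filtering, B iterates only over feasible q ≥ 0 (3q² ≤ 4Δ) and computes the exact r-interval per q by solving the quadratic (2r+q)² ≤ 4Δ−3q² with a hand-rolled integer sqrt, emitting rows already in sorted order so no sort is needed.
import Mathlib
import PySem

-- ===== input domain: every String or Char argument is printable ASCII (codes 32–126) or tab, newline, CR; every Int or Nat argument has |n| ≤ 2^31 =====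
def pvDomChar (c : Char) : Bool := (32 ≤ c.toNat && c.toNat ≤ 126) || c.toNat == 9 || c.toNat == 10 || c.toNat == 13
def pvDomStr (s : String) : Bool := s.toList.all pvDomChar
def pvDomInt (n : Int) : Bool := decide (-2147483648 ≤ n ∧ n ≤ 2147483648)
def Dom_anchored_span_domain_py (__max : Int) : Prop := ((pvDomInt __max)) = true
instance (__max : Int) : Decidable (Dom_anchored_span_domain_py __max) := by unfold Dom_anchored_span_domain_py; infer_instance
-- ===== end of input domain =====

-- B replaces A's filtered scan of the whole (2Δ+1)×(2Δ+1) grid by a loop over the feasible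
-- q ≥ 0 only, computing the exact r-interval per q from the quadratic (2r+q)² ≤ 4Δ−3q²
-- (hand-rolled integer sqrt); rows come out already sorted, so B does not sort.

-- ===== PORT A =====
-- _delta(a, b)
def pvDelta (a b : Int × Int) : Int :=
  let dq := a.1 - b.1
  let dr := a.2 - b.2
  dq * dq + dq * dr + dr * dr

-- Python tuple comparison 'point <= origin' (lexicographic on pairs of ints)
def pvTupLe (a b : Int × Int) : Bool :=
  a.1 < b.1 || (a.1 == b.1 && a.2 ≤ b.2)

def anchored_span_domain_py (__max : Int) : List (Int × Int) :=
  -- 'if Δ_max < 0: raise ValueError' is excluded by Pre_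
  let limit := __max
  let out : List (Int × Int) :=
    (PySem.List.pyRange (-limit) (limit + 1) 1).foldl (fun acc q =>
      (PySem.List.pyRange (-limit) (limit + 1) 1).foldl (fun acc2 r =>
        if pvTupLe (q, r) (0, 0) then acc2
        else if pvDelta (0, 0) (q, r) ≤ __max then acc2 ++ [(q, r)] else acc2) acc) []
  PySem.List.sorted2 out Prod.fst Prod.snd   -- out.sort()

-- ===== PORT B =====
-- 'while (s + 1) * (s + 1) <= D: s += 1'
def pvIsqrtUp (D s : Int) : Int :=
  if (s + 1) * (s + 1) ≤ D then pvIsqrtUp D (s + 1) else s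
termination_by (D + 1 - s).toNat
decreasing_by
  rename_i h
  have h1 : s + 1 ≤ (s + 1) * (s + 1) := by
    rcases le_or_gt (s + 1) 0 with h' | h'
    · exact h'.trans (mul_self_nonneg _)
    · calc s + 1 = (s + 1) * 1 := (mul_one _).symm
        _ ≤ (s + 1) * (s + 1) := mul_le_mul_of_nonneg_left h' (by omega)
  omega

-- the outer 'while 3 * q * q <= d4' loop of B, accumulating out
def pvBRows (d4 q : Int) (acc : List (Int × Int)) : List (Int × Int) :=
  if 3 * q * q ≤ d4 then
    let D := d4 - 3 * q * q
    let s := pvIsqrtUp D 0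
    let lo := if q = 0 then 1 else -(PySem.Int.floordiv (q + s) 2)
    let hi := PySem.Int.floordiv (s - q) 2
    pvBRows d4 (q + 1) (acc ++ (PySem.List.pyRange lo (hi + 1) 1).map (fun r => (q, r)))
  else acc
termination_by (d4 + 1 - q).toNat
decreasing_by
  rename_i h
  have hq : q ≤ d4 := by
    have h2 : q ≤ 3 * (q * q) := by
      rcases le_or_gt q 0 with h' | h'
      · exact h'.trans (by linarith [mul_self_nonneg q])
      · calc q = q * 1 := (mul_one _).symm
          _ ≤ q * q := mul_le_mul_of_nonneg_left (by omega) (by omega)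
          _ ≤ 3 * (q * q) := by linarith [mul_self_nonneg q]
    calc q ≤ 3 * (q * q) := h2
      _ = 3 * q * q := (mul_assoc 3 q q).symm
      _ ≤ d4 := h
  omega

def anchored_span_domain_py_alt (__max : Int) : List (Int × Int) :=
  -- 'if Δ_max < 0: raise ValueError' is excluded by Pre_
  pvBRows (4 * __max) 0 []

-- ===== PRECONDITION & SPEC =====
-- Pre_ excludes exactly the inputs with Δ_max < 0, on which A (and B) raise ValueError.
def Pre_anchored_span_domain_py (__max : Int) : Prop := 0 ≤ __max
instance (__max : Int) : Decidable (Pre_anchored_span_domain_py __max) := by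
  unfold Pre_anchored_span_domain_py; infer_instance

def pvWitness_anchored_span_domain_py : Int := (3)

def Spec_anchored_span_domain_py (__max : Int) (out : List (Int × Int)) : Prop :=
  out = anchored_span_domain_py_alt __max
instance (__max : Int) (out : List (Int × Int)) : Decidable (Spec_anchored_span_domain_py __max out) := by
  unfold Spec_anchored_span_domain_py; infer_instance

-- ===== CLAIM (what is proved, stated in full; the proofs are below) =====
def Claim_equal_anchored_span_domain_py : Prop :=
  ∀ (__max : Int), Dom_anchored_span_domain_py __max →
    Pre_anchored_span_domain_py __max →
    Spec_anchored_span_domain_py __max (anchored_span_domain_py __max)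

-- ===== LEMMAS AND PROOFS =====

-- strict lexicographic order on pairs (Python tuple '<')
def pvLexLt (a b : Int × Int) : Prop := a.1 < b.1 ∨ (a.1 = b.1 ∧ a.2 < b.2)

-- the per-q predicate of A's inner loop
def pvKeep (m q r : Int) : Bool :=
  !pvTupLe (q, r) (0, 0) && pvDelta (0, 0) (q, r) ≤ m

-- the row bounds and the row emitted for a given q by B
def pvS (m q : Int) : Int := pvIsqrtUp (4 * m - 3 * q * q) 0
def pvLo (m q : Int) : Int := if q = 0 then 1 else -(PySem.Int.floordiv (q + pvS m q) 2)
def pvHi (m q : Int) : Int := PySem.Int.floordiv (pvS m q - q) 2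
def pvRow (m q : Int) : List (Int × Int) :=
  (PySem.List.pyRange (pvLo m q) (pvHi m q + 1) 1).map (fun r => (q, r))
def pvRowFull (m q : Int) : List (Int × Int) :=
  if 3 * q * q ≤ 4 * m then pvRow m q else []

theorem pvIsqrtUp_spec (D s : Int) (hs : 0 ≤ s) (h : s * s ≤ D) :
    0 ≤ pvIsqrtUp D s ∧ pvIsqrtUp D s * pvIsqrtUp D s ≤ D ∧
      D < (pvIsqrtUp D s + 1) * (pvIsqrtUp D s + 1) := by
  fun_induction pvIsqrtUp D s with
  | case1 s hif ih => exact ih (by omega) hif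
  | case2 s hif => exact ⟨hs, h, by omega⟩

-- B's accumulator loop, characterised row by row
theorem pvBRows_eq (m q : Int) (acc : List (Int × Int)) (hm : 0 ≤ m) (hq : 0 ≤ q) :
    pvBRows (4 * m) q acc = acc ++ (PySem.List.pyRange q (m + 1) 1).flatMap (pvRowFull m) := by
  fun_induction pvBRows (4 * m) q acc with
  | case1 q acc h D s lo hi ih =>
      have hqm : q ≤ m := by nlinarith [mul_self_nonneg q, mul_self_nonneg (q - 1)]
      rw [ih (by omega), PySem.List.pyRange_one_cons (by omega : q < m + 1), List.flatMap_cons]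
      have hrow : pvRowFull m q = (PySem.List.pyRange lo (hi + 1) 1).map (fun r => (q, r)) := by
        simp only [pvRowFull, if_pos (by omega : 3 * q * q ≤ 4 * m), pvRow]
        rfl
      rw [hrow]
      simp
  | case2 q acc h =>
      have : (PySem.List.pyRange q (m + 1) 1).flatMap (pvRowFull m) = [] := by
        rw [List.flatMap_eq_nil_iff]
        intro x hx
        rw [PySem.List.mem_pyRange_one] at hx
        have : ¬ 3 * x * x ≤ 4 * m := by nlinarith
        simp [pvRowFull, this]
      simp [this]

theorem pvB_flat (m : Int) (hm : 0 ≤ m) :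
    anchored_span_domain_py_alt m = (PySem.List.pyRange 0 (m + 1) 1).flatMap (pvRowFull m) := by
  have := pvBRows_eq m 0 [] hm le_rfl
  simpa [anchored_span_domain_py_alt] using this

-- A's inner-loop predicate, unfolded
theorem pvKeep_iff (m q r : Int) (hq : 0 ≤ q) :
    pvKeep m q r = true ↔ (0 < q ∨ 1 ≤ r) ∧ q * q + q * r + r * r ≤ m := by
  simp only [pvKeep, pvTupLe, pvDelta, Bool.and_eq_true, Bool.not_eq_eq_eq_not,
    decide_eq_true_eq, Bool.and_eq_true]
  constructor
  · rintro ⟨h1, h2⟩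
    simp at h1 h2
    constructor
    · omega
    · nlinarith [h2]
  · rintro ⟨h1, h2⟩
    constructor
    · simp; omega
    · simp; nlinarith

-- filtering an Int range by an interval condition yields the subrange
theorem pvFilter_range_interval (a b lo hi : Int) (p : Int → Bool)
    (hiff : ∀ r : Int, a ≤ r → r < b → (p r = true ↔ lo ≤ r ∧ r ≤ hi))
    (hlo : a ≤ lo) (hhi : hi + 1 ≤ b) (hle : lo ≤ hi + 1) :
    (PySem.List.pyRange a b 1).filter p = PySem.List.pyRange lo (hi + 1) 1 := by
  rw [PySem.List.pyRange_one_append a lo b hlo (by omega),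
      PySem.List.pyRange_one_append lo (hi + 1) b hle hhi,
      List.filter_append, List.filter_append]
  have h1 : (PySem.List.pyRange a lo 1).filter p = [] := by
    rw [List.filter_eq_nil_iff]
    intro r hr
    rw [PySem.List.mem_pyRange_one] at hr
    intro hp
    have := (hiff r (by omega) (by omega)).1 hp
    omega
  have h2 : (PySem.List.pyRange lo (hi + 1) 1).filter p = PySem.List.pyRange lo (hi + 1) 1 := by
    rw [List.filter_eq_self]
    intro r hr
    rw [PySem.List.mem_pyRange_one] at hr
    exact (hiff r (by omega) (by omega)).2 (by omega)
  have h3 : (PySem.List.pyRange (hi + 1) b 1).filter p = [] := by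
    rw [List.filter_eq_nil_iff]
    intro r hr
    rw [PySem.List.mem_pyRange_one] at hr
    intro hp
    have := (hiff r (by omega) (by omega)).1 hp
    omega
  rw [h1, h2, h3]
  simp

-- the heart of the equivalence: A's filter over the full r-range is exactly B's row
theorem pvFilter_eq_rowFull (m q : Int) (hm : 0 ≤ m) (hq : 0 ≤ q) :
    ((PySem.List.pyRange (-m) (m + 1) 1).filter (pvKeep m q)).map (fun r => (q, r))
      = pvRowFull m q := by
  by_cases h3 : 3 * q * q ≤ 4 * m
  · -- feasible q
    set s : Int := pvS m q with hsdef
    have hs' : s = pvIsqrtUp (4 * m - 3 * q * q) 0 := by rw [hsdef, pvS]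
    obtain ⟨hs0, hs1, hs2⟩ := pvIsqrtUp_spec (4 * m - 3 * q * q) 0 le_rfl (by nlinarith)
    rw [← hs'] at hs0 hs1 hs2
    have hfd : ∀ x : Int, PySem.Int.floordiv x 2 = x / 2 := by
      intro x; simp [PySem.Int.floordiv, Int.fdiv_eq_ediv]
    have habs : ∀ x : Int, x * x ≤ 4 * m - 3 * q * q ↔ -s ≤ x ∧ x ≤ s := by
      intro x
      constructor
      · intro hx
        constructor <;> by_contra hc <;> push_neg at hc <;> nlinarith
      · rintro ⟨h1, h2⟩; nlinarith
    have hform : ∀ r : Int, q * q + q * r + r * r ≤ m ↔ -s ≤ 2 * r + q ∧ 2 * r + q ≤ s := by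
      intro r
      rw [← habs (2 * r + q)]
      constructor <;> intro <;> nlinarith
    set lo : Int := pvLo m q with hlo'
    set hi : Int := pvHi m q with hhi'
    have hlodef : lo = if q = 0 then 1 else -(PySem.Int.floordiv (q + s) 2) := by
      rw [hlo', pvLo, ← hsdef]
    have hhidef : hi = PySem.Int.floordiv (s - q) 2 := by
      rw [hhi', pvHi, ← hsdef]
    have hhid : hi = (s - q) / 2 := by rw [hhidef, hfd]
    have hkey : ∀ r : Int, pvKeep m q r = true ↔ lo ≤ r ∧ r ≤ hi := by
      intro r
      rw [pvKeep_iff m q r hq, hform r]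
      rw [hlodef, hhidef, hfd, hfd]
      by_cases hq0 : q = 0
      · subst hq0; simp; omega
      · rw [if_neg hq0]; omega
    have hrow : pvRowFull m q = (PySem.List.pyRange lo (hi + 1) 1).map (fun r => (q, r)) := by
      rw [pvRowFull, if_pos h3]; rfl
    rw [hrow]
    by_cases hne : lo ≤ hi
    · -- nonempty row: establish bounds and use the interval lemma
      have hhib : 2 * hi ≤ s - q ∧ s - q < 2 * hi + 2 := by rw [hhid]; omega
      have hQlo : -s ≤ 2 * lo + q ∧ 2 * lo + q ≤ s := by
        by_cases hq0 : q = 0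
        · have h1 : lo = 1 := by rw [hlodef, if_pos hq0]
          subst hq0; omega
        · have h1 : lo = -((q + s) / 2) := by rw [hlodef, if_neg hq0, hfd]
          omega
      have hQhi : -s ≤ 2 * hi + q ∧ 2 * hi + q ≤ s := by omega
      have hform_lo : q * q + q * lo + lo * lo ≤ m := by
        have := (hform lo).2 hQlo; linarith
      have hform_hi : q * q + q * hi + hi * hi ≤ m := by
        have := (hform hi).2 hQhi; linarith
      have hblo : -m ≤ lo := by nlinarith [sq_nonneg (2*q + lo), sq_nonneg (lo + 1), mul_self_nonneg q]
      have hbhi : hi ≤ m := by nlinarith [sq_nonneg (2*q + hi), sq_nonneg (hi - 1), mul_self_nonneg q]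
      rw [pvFilter_range_interval (-m) (m+1) lo hi (pvKeep m q)
            (fun r _ _ => hkey r) hblo (by omega) (by omega)]
    · -- empty row
      have hf : (PySem.List.pyRange (-m) (m + 1) 1).filter (pvKeep m q) = [] := by
        rw [List.filter_eq_nil_iff]
        intro r _ hp
        have := (hkey r).1 hp
        omega
      rw [hf, PySem.List.pyRange_one_eq_nil (by omega)]
  · -- infeasible q: both sides empty
    have hf : (PySem.List.pyRange (-m) (m + 1) 1).filter (pvKeep m q) = [] := by
      rw [List.filter_eq_nil_iff]
      intro r _ hp
      rw [pvKeep_iff m q r hq] at hp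
      nlinarith [hp.2, sq_nonneg (2*r + q)]
    rw [hf, pvRowFull, if_neg h3]
    simp

-- rows with negative q are filtered away entirely
theorem pvFilter_neg (m q : Int) (hq : q < 0) :
    (PySem.List.pyRange (-m) (m + 1) 1).filter (pvKeep m q) = [] := by
  rw [List.filter_eq_nil_iff]
  intro r _ hp
  simp [pvKeep, pvTupLe] at hp
  omega

-- A's double loop, flattened into rows
theorem pvOutA_flat (m : Int) (hm : 0 ≤ m) :
    ((PySem.List.pyRange (-m) (m + 1) 1).foldl (fun acc q =>
      (PySem.List.pyRange (-m) (m + 1) 1).foldl (fun acc2 r =>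
        if pvTupLe (q, r) (0, 0) then acc2
        else if pvDelta (0, 0) (q, r) ≤ m then acc2 ++ [(q, r)] else acc2) acc) [])
    = (PySem.List.pyRange 0 (m + 1) 1).flatMap (pvRowFull m) := by
  have hinner : ∀ (q : Int) (acc : List (Int × Int)),
      (PySem.List.pyRange (-m) (m + 1) 1).foldl (fun acc2 r =>
        if pvTupLe (q, r) (0, 0) then acc2
        else if pvDelta (0, 0) (q, r) ≤ m then acc2 ++ [(q, r)] else acc2) acc
      = acc ++ ((PySem.List.pyRange (-m) (m + 1) 1).filter (pvKeep m q)).map (fun r => (q, r)) := by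
    intro q acc
    rw [← PySem.List.foldl_append_if (pvKeep m q) (fun r => (q, r))]
    apply PySem.List.foldl_congr_mem
    intro acc2 r _
    by_cases h1 : pvTupLe (q, r) (0, 0) <;> by_cases h2 : pvDelta (0, 0) (q, r) ≤ m <;>
      simp [pvKeep, h1, h2]
  have houter := PySem.List.foldl_congr_mem
    (l := PySem.List.pyRange (-m) (m + 1) 1)
    (init := ([] : List (Int × Int)))
    (f := fun acc q => (PySem.List.pyRange (-m) (m + 1) 1).foldl (fun acc2 r =>
      if pvTupLe (q, r) (0, 0) then acc2
      else if pvDelta (0, 0) (q, r) ≤ m then acc2 ++ [(q, r)] else acc2) acc)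
    (g := fun (acc : List (Int × Int)) (q : Int) => acc ++
      ((PySem.List.pyRange (-m) (m + 1) 1).filter (pvKeep m q)).map (fun r => (q, r)))
    (fun acc q _ => hinner q acc)
  rw [houter, PySem.List.foldl_append_eq_flatMap, List.nil_append]
  set G : Int → List (Int × Int) := fun q =>
    ((PySem.List.pyRange (-m) (m + 1) 1).filter (pvKeep m q)).map (fun r => (q, r)) with hG
  rw [PySem.List.pyRange_one_append (-m) 0 (m + 1) (by omega) (by omega),
      List.flatMap_append]
  have h1 : (PySem.List.pyRange (-m) 0 1).flatMap G = [] := by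
    rw [List.flatMap_eq_nil_iff]
    intro q hq
    rw [PySem.List.mem_pyRange_one] at hq
    rw [hG]
    simp only
    rw [pvFilter_neg m q (by omega)]
    rfl
  rw [h1, List.nil_append]
  rw [List.flatMap_def, List.flatMap_def]
  congr 1
  apply List.map_congr_left
  intro q hq
  rw [PySem.List.mem_pyRange_one] at hq
  rw [hG]
  exact pvFilter_eq_rowFull m q hm (by omega)

-- every element of a row carries its q
theorem pvRowFull_fst (m q : Int) : ∀ x ∈ pvRowFull m q, x.1 = q := by
  intro x hx
  unfold pvRowFull pvRow at hx
  split at hx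
  · simp at hx; obtain ⟨r, _, rfl⟩ := hx; rfl
  · simp at hx

theorem pvRowFull_pairwise (m q : Int) : (pvRowFull m q).Pairwise pvLexLt := by
  unfold pvRowFull pvRow
  split
  · rw [List.pairwise_map]
    exact (PySem.List.pairwise_lt_pyRange_one _ _).imp (fun h => Or.inr ⟨rfl, h⟩)
  · exact List.Pairwise.nil

-- the flattened rows are strictly lexicographically increasing
theorem pvFlat_pairwise (m : Int) :
    ((PySem.List.pyRange 0 (m + 1) 1).flatMap (pvRowFull m)).Pairwise pvLexLt := by
  rw [List.flatMap_def, List.pairwise_flatten]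
  constructor
  · intro l' hl'
    simp only [List.mem_map] at hl'
    obtain ⟨q, _, rfl⟩ := hl'
    exact pvRowFull_pairwise m q
  · rw [List.pairwise_map]
    apply (PySem.List.pairwise_lt_pyRange_one _ _).imp
    intro a b hab x hx y hy
    left
    rw [pvRowFull_fst m a x hx, pvRowFull_fst m b y hy]
    exact hab

-- Python's .sort() on a strictly lex-increasing list of pairs is the identity
theorem pvFoldl_insertBy (xs acc : List (Int × Int))
    (hacc : ∀ a ∈ acc, ∀ b ∈ xs, pvLexLt a b)
    (hxs : xs.Pairwise pvLexLt) :
    xs.foldl (fun acc x => PySem.List.insertBy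
      (fun a b => decide (a.1 < b.1) || !decide (b.1 < a.1) && decide (a.2 < b.2)) x acc) acc
      = acc ++ xs := by
  induction xs generalizing acc with
  | nil => simp
  | cons x t ih =>
      rw [List.foldl_cons, PySem.List.insertBy_of_forall_not_before]
      · rw [ih (acc ++ [x])]
        · simp
        · intro a ha b hb
          rcases List.mem_append.1 ha with h | h
          · exact hacc a h b (List.mem_cons_of_mem _ hb)
          · simp at h; subst h
            exact (List.pairwise_cons.1 hxs).1 b hb
        · exact (List.pairwise_cons.1 hxs).2
      · intro y hy
        have := hacc y hy x (List.mem_cons_self)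
        rcases this with h | ⟨h1, h2⟩ <;> simp [pvLexLt] at * <;> omega

theorem pvSorted2_eq_self (xs : List (Int × Int)) (h : xs.Pairwise pvLexLt) :
    PySem.List.sorted2 xs Prod.fst Prod.snd = xs := by
  have := pvFoldl_insertBy xs [] (by simp) h
  simpa [PySem.List.sorted2] using this

-- ===== VERDICT (by name: the statement is the Claim_ definition above) =====
theorem anchored_span_domain_py_spec : Claim_equal_anchored_span_domain_py := by
  intro m _ hpre
  unfold Spec_anchored_span_domain_py
  have ha : anchored_span_domain_py m =
      PySem.List.sorted2 ((PySem.List.pyRange (-m) (m + 1) 1).foldl (fun acc q =>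
        (PySem.List.pyRange (-m) (m + 1) 1).foldl (fun acc2 r =>
          if pvTupLe (q, r) (0, 0) then acc2
          else if pvDelta (0, 0) (q, r) ≤ m then acc2 ++ [(q, r)] else acc2) acc) [])
        Prod.fst Prod.snd := rfl
  rw [ha, pvOutA_flat m hpre, pvSorted2_eq_self _ (pvFlat_pairwise m), pvB_flat m hpre]
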